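-- pv_equiv track=rewrite | github.com/yanghao13111/YC_QuantitativeTrading | Day_Trade/main.py | generate_expressions
-- ===== SOURCE A (Python) =====
-- from itertools import combinations, product
--
-- def generate_expressions(conditions, combined_number):
--     expressions = []
--     for r in range(1, min(len(conditions), combined_number) + 1):
--         for subset in combinations(conditions, r):
--             if len(subset) == 1:
--                 expressions.append(subset[0])
--             else:
--                 operators = list(product([' and ', ' or '], repeat=len(subset)-1))
--                 for operator in operators:
--                     expr = ''
--                     for i, cond in enumerate(subset):
--                         expr += cond
--                         if i < len(operator):
--                             expr += operator[i]
--                     expressions.append(expr)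
--     return expressions
-- ===== SOURCE B (Python) =====
-- def generate_expressions(conditions, combined_number):
--     from itertools import combinations
--     expressions = []
--     for r in range(1, min(len(conditions), combined_number) + 1):
--         for subset in combinations(conditions, r):
--             parts = [subset[0]]
--             for cond in subset[1:]:
--                 parts = [p + op + cond for p in parts for op in (' and ', ' or ')]
--             expressions.extend(parts)
--     return expressions
-- ===== Notes on version B (the rewrite author's own statement) =====
-- stated objective: simpler
-- what changed: Replaces itertools.product over operators plus the manual enumerate/index interleaving (and the len==1 special case) with an incremental fold that expands the partial-expression list one condition at a time.
import Mathlib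
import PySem

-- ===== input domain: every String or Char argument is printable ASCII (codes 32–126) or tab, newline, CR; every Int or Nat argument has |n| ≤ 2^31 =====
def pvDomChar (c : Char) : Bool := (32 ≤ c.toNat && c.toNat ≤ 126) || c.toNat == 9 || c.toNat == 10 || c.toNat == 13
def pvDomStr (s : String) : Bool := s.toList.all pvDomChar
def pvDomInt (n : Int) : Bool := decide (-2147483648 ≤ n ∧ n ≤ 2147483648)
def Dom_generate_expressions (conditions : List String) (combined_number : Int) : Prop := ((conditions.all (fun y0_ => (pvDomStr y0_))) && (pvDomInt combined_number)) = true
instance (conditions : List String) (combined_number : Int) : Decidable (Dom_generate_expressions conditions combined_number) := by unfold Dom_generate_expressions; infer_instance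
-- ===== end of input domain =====

-- B replaces itertools.product + manual index interleaving by an incremental left fold over the
-- subset (parts = [p + op + cond ...]), removing the len==1 special case; objective: simpler.

-- ===== PORT A =====
-- list(product([' and ', ' or '], repeat=n)), in itertools order (leftmost varies slowest)
def pvProdRep : Nat → List (List String)
  | 0 => [[]]
  | n + 1 => [" and ", " or "].flatMap (fun a => (pvProdRep n).map (a :: ·))

-- the inner 'for i, cond in enumerate(subset): expr += cond; if i < len(operator): expr += operator[i]'
def pvBuildExpr (subset : List String) (operator : List String) : String :=
  (PySem.List.enumerate subset 0).foldl
    (fun expr p =>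
      let expr := expr ++ p.2
      if p.1 < (operator.length : Int) then expr ++ PySem.List.pyGetD operator p.1 "" else expr)
    ""

-- 'expressions.append(e)' is encoded as the O(1) cons 'e :: expressions' with one final
-- 'reverse' at return (the amassed-list state is kept reversed; same elements, same order)
def generate_expressions (conditions : List String) (combined_number : Int) : List String :=
  ((PySem.List.pyRange 1 (min (conditions.length : Int) combined_number + 1) 1).foldl
    (fun expressions r =>
      (PySem.List.combinations conditions r.toNat).foldl
        (fun expressions subset =>
          if subset.length == 1 then
            PySem.List.pyGetD subset 0 "" :: expressions
          else
            let operators := pvProdRep (subset.length - 1)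
            operators.foldl (fun expressions operator =>
              pvBuildExpr subset operator :: expressions) expressions)
        expressions)
    []).reverse

-- ===== PORT B =====
-- parts = [p + op + cond for p in parts for op in (' and ', ' or ')]
def pvExpand (parts : List String) (cond : String) : List String :=
  parts.flatMap (fun p => [p ++ " and " ++ cond, p ++ " or " ++ cond])

-- 'expressions.extend(parts)' is likewise encoded with the reversed accumulator:
-- 'parts.reverseAux expressions' (= parts.reverse ++ expressions), one final 'reverse' at return
def generate_expressions_alt (conditions : List String) (combined_number : Int) : List String :=
  ((PySem.List.pyRange 1 (min (conditions.length : Int) combined_number + 1) 1).foldl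
    (fun expressions r =>
      (PySem.List.combinations conditions r.toNat).foldl
        (fun expressions subset =>
          ((subset.drop 1).foldl pvExpand [PySem.List.pyGetD subset 0 ""]).reverseAux
            expressions)
        expressions)
    []).reverse

-- ===== PRECONDITION & SPEC =====
def Spec_generate_expressions (conditions : List String) (combined_number : Int) (out : List String) : Prop := out = generate_expressions_alt conditions combined_number
instance (conditions : List String) (combined_number : Int) (out : List String) : Decidable (Spec_generate_expressions conditions combined_number out) := by unfold Spec_generate_expressions; infer_instance

-- ===== CLAIM (what is proved, stated in full; the proofs are below) =====
def Claim_equal_generate_expressions : Prop := ∀ (conditions : List String) (combined_number : Int), Dom_generate_expressions conditions combined_number → Spec_generate_expressions conditions combined_number (generate_expressions conditions combined_number)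

-- ===== LEMMAS AND PROOFS =====

-- ' op0 ++ x0 ++ op1 ++ x1 ++ …' : the tail of an expression after its first condition
def pvGlueOps : List String → List String → String
  | [], _ => ""
  | x :: xs, [] => x ++ pvGlueOps xs []
  | x :: xs, o :: os => o ++ (x ++ pvGlueOps xs os)

-- 'x0 ++ op0 ++ x1 ++ op1 ++ …' : each condition followed by its operator if one remains
def pvGlue : List String → List String → String
  | [], _ => ""
  | x :: xs, [] => x ++ pvGlue xs []
  | x :: xs, o :: os => x ++ (o ++ pvGlue xs os)

theorem pvProdRep_length {O : List String} {n : Nat} (h : O ∈ pvProdRep n) :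
    O.length = n := by
  induction n generalizing O with
  | zero => simp [pvProdRep] at h; simp [h]
  | succ m ih =>
    simp only [pvProdRep, List.mem_flatMap, List.mem_map] at h
    obtain ⟨a, -, t, ht, rfl⟩ := h
    simp [ih ht]

theorem pvGlue_cons (c : String) (cs O : List String) (hO : O.length = cs.length) :
    pvGlue (c :: cs) O = c ++ pvGlueOps cs O := by
  induction cs generalizing c O with
  | nil =>
    rw [List.length_nil, List.length_eq_zero_iff] at hO
    subst hO; simp [pvGlue, pvGlueOps]
  | cons x xs ih =>
    cases O with
    | nil => simp at hO
    | cons o os =>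
      simp only [List.length_cons, Nat.add_right_cancel_iff] at hO
      simp [pvGlue, pvGlueOps, ih x os hO]

theorem pvBuildExpr_loop (O : List String) (cs : List String) : ∀ (k : Nat) (acc : String),
    (PySem.List.enumerate cs (k : Int)).foldl
      (fun expr p =>
        let expr := expr ++ p.2
        if p.1 < (O.length : Int) then expr ++ PySem.List.pyGetD O p.1 "" else expr)
      acc = acc ++ pvGlue cs (O.drop k) := by
  induction cs with
  | nil => intro k acc; simp [PySem.List.enumerate_nil, pvGlue]
  | cons x xs ih =>
    intro k acc
    rw [PySem.List.enumerate_cons]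
    simp only [List.foldl_cons]
    by_cases hk : k < O.length
    · have hO : O.drop k = O[k] :: O.drop (k + 1) := List.drop_eq_getElem_cons hk
      have : ((k : Int) + 1) = ((k + 1 : Nat) : Int) := by push_cast; ring
      rw [this, ih (k + 1)]
      rw [if_pos (by exact_mod_cast hk : ((k : Int) < (O.length : Int)))]
      rw [PySem.List.pyGetD_natCast, hO]
      simp only [pvGlue, List.getD_eq_getElem _ _ hk]
      simp [String.append_assoc]
    · have hO : O.drop k = [] := List.drop_eq_nil_of_le (by omega)
      have hO' : O.drop (k + 1) = [] := List.drop_eq_nil_of_le (by omega)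
      have : ((k : Int) + 1) = ((k + 1 : Nat) : Int) := by push_cast; ring
      rw [this, ih (k + 1)]
      simp only [if_neg (by exact_mod_cast hk : ¬ ((k : Int) < (O.length : Int)))]
      simp [hO, hO', pvGlue, String.append_assoc]

theorem pvBuildExpr_glue (c : String) (cs O : List String) (hO : O.length = cs.length) :
    pvBuildExpr (c :: cs) O = c ++ pvGlueOps cs O := by
  have h := pvBuildExpr_loop O (c :: cs) 0 ""
  simp only [List.drop_zero, Int.natCast_zero] at h
  rw [pvBuildExpr, h, pvGlue_cons c cs O hO]
  simp

theorem pvFold_expand_append (cs : List String) : ∀ (u v : List String),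
    cs.foldl pvExpand (u ++ v) = cs.foldl pvExpand u ++ cs.foldl pvExpand v := by
  induction cs with
  | nil => intro u v; simp
  | cons x xs ih =>
    intro u v
    simp only [List.foldl_cons]
    rw [show pvExpand (u ++ v) x = pvExpand u x ++ pvExpand v x from by
      simp [pvExpand], ih]

theorem pvFold_expand_eq_map (cs : List String) : ∀ (p : String),
    cs.foldl pvExpand [p] = (pvProdRep cs.length).map (fun O => p ++ pvGlueOps cs O) := by
  induction cs with
  | nil => intro p; simp [pvProdRep, pvGlueOps]
  | cons x xs ih =>
    intro p
    simp only [List.foldl_cons, List.length_cons]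
    have hexp : pvExpand [p] x = [p ++ " and " ++ x] ++ [p ++ " or " ++ x] := by
      simp [pvExpand]
    rw [hexp, pvFold_expand_append, ih, ih]
    simp only [pvProdRep, List.flatMap_cons, List.flatMap_nil, List.append_nil,
      List.map_append, List.map_map]
    congr 1
    · exact List.map_congr_left (fun O _ => by
        simp [Function.comp, pvGlueOps, String.append_assoc])
    · exact List.map_congr_left (fun O _ => by
        simp [Function.comp, pvGlueOps, String.append_assoc])

theorem pvFoldl_cons_eq_reverse_map {α β : Type} (f : α → β) (l : List α) (acc : List β) :
    l.foldl (fun acc x => f x :: acc) acc = (l.map f).reverse ++ acc := by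
  induction l generalizing acc with
  | nil => simp
  | cons x xs ih => simp [ih]

theorem pvSubset_step (subset acc : List String) (hne : subset ≠ []) :
    (if subset.length == 1 then
        PySem.List.pyGetD subset 0 "" :: acc
      else
        (pvProdRep (subset.length - 1)).foldl
          (fun expressions operator => pvBuildExpr subset operator :: expressions) acc)
    = ((subset.drop 1).foldl pvExpand [PySem.List.pyGetD subset 0 ""]).reverseAux acc := by
  obtain ⟨c, cs, rfl⟩ := List.exists_cons_of_ne_nil hne
  have hget : PySem.List.pyGetD (c :: cs) 0 "" = c := by
    simp [PySem.List.pyGetD]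
  rw [hget]
  cases cs with
  | nil => simp
  | cons y ys =>
    rw [if_neg (by simp : ¬ ((((c :: y :: ys).length == 1)) = true))]
    simp only [List.length_cons, Nat.add_sub_cancel, List.drop_succ_cons, List.drop_zero,
      List.reverseAux_eq]
    rw [pvFoldl_cons_eq_reverse_map, pvFold_expand_eq_map]
    congr 2
    refine List.map_congr_left (fun O hO => ?_)
    exact pvBuildExpr_glue c (y :: ys) O (by simpa using pvProdRep_length hO)

-- ===== VERDICT (by name: the statement is the Claim_ definition above) =====
theorem generate_expressions_spec : Claim_equal_generate_expressions := by
  intro conditions combined_number _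
  unfold Spec_generate_expressions generate_expressions generate_expressions_alt
  congr 1
  apply PySem.List.foldl_congr_mem
  intro acc r hr
  apply PySem.List.foldl_congr_mem
  intro acc' subset hs
  have hr1 : (1 : Int) ≤ r := (PySem.List.mem_pyRange_one.mp hr).1
  have hlen : subset.length = r.toNat := PySem.List.length_of_mem_combinations hs
  have hne : subset ≠ [] := by
    intro h; rw [h] at hlen; simp at hlen; omega
  exact pvSubset_step subset acc' hne
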